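-- pv_equiv track=rewrite | github.com/trosendo/Python | Exercicios 12-ficheiros/5.py | alunos_maior_nota
-- ===== SOURCE A (Python) =====
-- def alunos_maior_nota(dnotas):
--     x=0
--     for i in dnotas.values():
--         if x==0:
--             maximo=i[1]
--         if i[1]>maximo:
--             maximo=i[1]
--         x+=1
--     nota_alunos=(maximo, [])
--     for i in dnotas.keys():
--         if dnotas[i][1]==maximo:
--             nota_alunos[1].append(i)
--     return nota_alunos
-- ===== SOURCE B (Python) =====
-- def alunos_maior_nota(dnotas):
--     alunos = []
--     for chave, notas in dnotas.items():
--         nota = notas[1]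
--         if not alunos or nota > maximo:
--             maximo = nota
--             alunos = [chave]
--         elif nota == maximo:
--             alunos.append(chave)
--     return (maximo, alunos)
-- ===== Notes on version B (the rewrite author's own statement) =====
-- stated objective: simpler
-- what changed: Replaces A's two passes (a counter-gated max scan followed by a second pass over the keys that re-looks each key up in the dict) by one single pass over dnotas.items() that maintains the running maximum together with the list of students achieving it.
import Mathlib
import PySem

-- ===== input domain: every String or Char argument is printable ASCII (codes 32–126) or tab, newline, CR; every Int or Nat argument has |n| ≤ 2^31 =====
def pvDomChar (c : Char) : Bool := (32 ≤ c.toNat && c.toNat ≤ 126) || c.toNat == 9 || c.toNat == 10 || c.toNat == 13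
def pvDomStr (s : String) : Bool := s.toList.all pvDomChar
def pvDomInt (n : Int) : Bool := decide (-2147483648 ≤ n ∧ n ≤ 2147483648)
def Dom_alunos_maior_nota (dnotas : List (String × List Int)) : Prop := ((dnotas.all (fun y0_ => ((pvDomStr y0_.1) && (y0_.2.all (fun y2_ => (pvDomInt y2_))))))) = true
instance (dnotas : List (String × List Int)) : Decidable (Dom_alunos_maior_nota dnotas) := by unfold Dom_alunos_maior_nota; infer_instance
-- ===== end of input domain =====

-- B replaces A's two passes (max scan + a second key pass with a dict lookup per key)
-- by one single pass keeping the running maximum and its list of students (objective: simpler).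

-- i[1]: Python grade access; exact whenever the list has ≥ 2 elements (guaranteed by Pre_)
def pvGrade (v : List Int) : Int := (PySem.List.pyGet? v 1).getD 0

-- ===== PORT A =====
-- A's first loop body: 'if x==0: maximo=i[1]; if i[1]>maximo: maximo=i[1]; x+=1' on state (x, maximo)
def pvStepA (s : Int × Int) (i : String × List Int) : Int × Int :=
  let maximo := if s.1 == 0 then pvGrade i.2 else s.2
  let maximo := if pvGrade i.2 > maximo then pvGrade i.2 else maximo
  (s.1 + 1, maximo)

-- A's second loop body: 'if dnotas[i][1]==maximo: …append(i)'; List.lookup = Python dict lookup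
-- (first match on the key; exact since a dict's keys are unique — see Pre_)
def pvStepA2 (d : List (String × List Int)) (maximo : Int) (acc : List String) (i : String × List Int) : List String :=
  if pvGrade ((d.lookup i.1).getD []) == maximo then acc ++ [i.1] else acc

def alunos_maior_nota (dnotas : List (String × List Int)) : Int × List String :=
  let maximo := (dnotas.foldl pvStepA (0, 0)).2
  let alunos := dnotas.foldl (pvStepA2 dnotas maximo) []
  (maximo, alunos)

-- ===== PORT B =====
-- B's single-pass loop body on state (maximo, alunos)
def pvStepB (s : Int × List String) (i : String × List Int) : Int × List String :=
  let nota := pvGrade i.2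
  if s.2.isEmpty || nota > s.1 then (nota, [i.1])
  else if nota == s.1 then (s.1, s.2 ++ [i.1]) else s

def alunos_maior_nota_alt (dnotas : List (String × List Int)) : Int × List String :=
  dnotas.foldl pvStepB (0, [])

-- ===== PRECONDITION & SPEC =====
-- Pre_ excludes: the empty dict (A raises UnboundLocalError), a value list with < 2 entries
-- (i[1] raises IndexError), and duplicate keys (impossible in a Python dict, so not an input A accepts).
def Pre_alunos_maior_nota (dnotas : List (String × List Int)) : Prop :=
  dnotas ≠ [] ∧ (∀ p ∈ dnotas, 2 ≤ p.2.length) ∧ (dnotas.map Prod.fst).Nodup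
instance (dnotas : List (String × List Int)) : Decidable (Pre_alunos_maior_nota dnotas) := by
  unfold Pre_alunos_maior_nota; infer_instance
def pvWitness_alunos_maior_nota : (List (String × List Int)) :=
  [("ana", [10, 15]), ("rui", [3, 12]), ("bea", [0, 15])]
def Spec_alunos_maior_nota (dnotas : List (String × List Int)) (out : Int × List String) : Prop := out = alunos_maior_nota_alt dnotas
instance (dnotas : List (String × List Int)) (out : Int × List String) : Decidable (Spec_alunos_maior_nota dnotas out) := by unfold Spec_alunos_maior_nota; infer_instance

-- ===== CLAIM (what is proved, stated in full; the proofs are below) =====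
def Claim_equal_alunos_maior_nota : Prop := ∀ (dnotas : List (String × List Int)), Dom_alunos_maior_nota dnotas → Pre_alunos_maior_nota dnotas → Spec_alunos_maior_nota dnotas (alunos_maior_nota dnotas)

-- ===== LEMMAS AND PROOFS =====

-- the plain running-max step both analyses are reduced to
def pvMaxStep (m : Int) (i : String × List Int) : Int := max m (pvGrade i.2)

lemma pvIfMax (g m : Int) : (if g > m then g else m) = max m g := by
  rw [max_def]; split_ifs <;> omega

lemma pvStepA_of_ne (x m : Int) (i : String × List Int) (hx : 1 ≤ x) :
    pvStepA (x, m) i = (x + 1, pvMaxStep m i) := by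
  have hx0 : (x == 0) = false := by simp only [beq_eq_false_iff_ne, ne_eq]; omega
  simp only [pvStepA, pvMaxStep, hx0, Bool.false_eq_true, if_false, pvIfMax]

-- A's first loop, after the first iteration (counter ≥ 1): a plain running max
lemma foldA_snd (l : List (String × List Int)) :
    ∀ (x m : Int), 1 ≤ x → (l.foldl pvStepA (x, m)).2 = l.foldl pvMaxStep m := by
  induction l with
  | nil => intro x m _; rfl
  | cons i l ih =>
      intro x m hx
      rw [List.foldl_cons, List.foldl_cons, pvStepA_of_ne x m i hx]
      exact ih (x + 1) _ (by omega)

-- under unique keys, the dict lookup of a present key returns that pair's value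
lemma lookup_self (l : List (String × List Int)) (h : (l.map Prod.fst).Nodup)
    (p : String × List Int) (hp : p ∈ l) : l.lookup p.1 = some p.2 := by
  induction l with
  | nil => cases hp
  | cons q l ih =>
      simp only [List.map_cons, List.nodup_cons] at h
      rcases List.mem_cons.mp hp with rfl | hp'
      · simp [List.lookup]
      · have hne : (p.1 == q.1) = false := by
          simp only [beq_eq_false_iff_ne, ne_eq]
          intro he
          exact h.1 (he ▸ List.mem_map_of_mem (f := Prod.fst) hp')
        simp only [List.lookup, hne]
        exact ih h.2 hp'

lemma pvStepB_of_gt (m : Int) (al : List String) (i : String × List Int)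
    (h : pvGrade i.2 > m) : pvStepB (m, al) i = (pvGrade i.2, [i.1]) := by
  simp [pvStepB, h]

lemma pvStepB_of_eq (m : Int) (al : List String) (i : String × List Int) (hal : al.isEmpty = false)
    (h : pvGrade i.2 = m) : pvStepB (m, al) i = (m, al ++ [i.1]) := by
  simp [pvStepB, hal, h]

lemma pvStepB_of_lt (m : Int) (al : List String) (i : String × List Int) (hal : al.isEmpty = false)
    (h : pvGrade i.2 < m) : pvStepB (m, al) i = (m, al) := by
  have h1 : ¬ pvGrade i.2 > m := by omega
  have h2 : (pvGrade i.2 == m) = false := by simp only [beq_eq_false_iff_ne, ne_eq]; omega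
  simp [pvStepB, hal, h1, h2]

-- B's loop from a state already holding a nonempty candidate list: the running max together
-- with the keys of the scanned entries that attain the FINAL max (prefix keys kept iff no later grade beats m)
lemma foldB (l : List (String × List Int)) :
    ∀ (m : Int) (al : List String), al ≠ [] →
      l.foldl pvStepB (m, al)
      = (l.foldl pvMaxStep m,
         (if l.foldl pvMaxStep m = m then al else [])
           ++ (l.filter (fun i => pvGrade i.2 == l.foldl pvMaxStep m)).map Prod.fst) := by
  induction l with
  | nil => intro m al _; simp
  | cons i l ih =>
      intro m al hal
      have hal' : al.isEmpty = false := by simpa [List.isEmpty_iff] using hal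
      have hle : ∀ (m' : Int), m' ≤ l.foldl pvMaxStep m' := fun m' =>
        (PySem.List.le_foldl_max_int l (fun i => pvGrade i.2) m').1
      rw [List.foldl_cons, List.foldl_cons]
      rcases lt_trichotomy m (pvGrade i.2) with hgt | heq | hlt
      · have hstep : pvMaxStep m i = pvGrade i.2 := by
          rw [pvMaxStep, max_def]; split_ifs <;> omega
        have hMge : pvGrade i.2 ≤ l.foldl pvMaxStep (pvGrade i.2) := hle _
        rw [pvStepB_of_gt m al i hgt, ih _ [i.1] (by simp), hstep]
        have hMne : ¬ l.foldl pvMaxStep (pvGrade i.2) = m := by omega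
        rw [if_neg hMne, List.nil_append]
        by_cases hE : pvGrade i.2 = l.foldl pvMaxStep (pvGrade i.2)
        · have hb : (pvGrade i.2 == l.foldl pvMaxStep (pvGrade i.2)) = true := by
            simpa only [beq_iff_eq] using hE
          rw [if_pos hE.symm, List.filter_cons, if_pos hb, List.map_cons, List.singleton_append]
        · have hb : (pvGrade i.2 == l.foldl pvMaxStep (pvGrade i.2)) = false := by
            simpa only [beq_eq_false_iff_ne, ne_eq] using hE
          rw [if_neg (fun h => hE h.symm), List.filter_cons, hb]
          simp
      · have hstep : pvMaxStep m i = m := by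
          rw [pvMaxStep, max_def]; split_ifs <;> omega
        rw [pvStepB_of_eq m al i hal' heq.symm, ih _ (al ++ [i.1]) (by simp), hstep,
            List.filter_cons]
        by_cases hM : l.foldl pvMaxStep m = m
        · have hb : (pvGrade i.2 == l.foldl pvMaxStep m) = true := by
            simp only [beq_iff_eq]; omega
          rw [if_pos hM, if_pos hM, hb, if_pos rfl, List.map_cons]
          simp
        · have hb : (pvGrade i.2 == l.foldl pvMaxStep m) = false := by
            simp only [beq_eq_false_iff_ne, ne_eq]; omega
          rw [if_neg hM, if_neg hM, hb]
          simp
      · have hstep : pvMaxStep m i = m := by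
          rw [pvMaxStep, max_def]; split_ifs <;> omega
        rw [pvStepB_of_lt m al i hal' hlt, ih _ al hal, hstep]
        have hb : (pvGrade i.2 == l.foldl pvMaxStep m) = false := by
          have := hle m
          simp only [beq_eq_false_iff_ne, ne_eq]; omega
        rw [List.filter_cons, hb]
        simp

-- ===== VERDICT (by name: the statement is the Claim_ definition above) =====
theorem alunos_maior_nota_spec : Claim_equal_alunos_maior_nota := by
  intro dnotas _ hpre
  obtain ⟨hne, _, hnd⟩ := hpre
  obtain ⟨p, rest, rfl⟩ : ∃ p rest, dnotas = p :: rest := by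
    cases dnotas with
    | nil => exact absurd rfl hne
    | cons p rest => exact ⟨p, rest, rfl⟩
  simp only [Spec_alunos_maior_nota, alunos_maior_nota, alunos_maior_nota_alt]
  have hA1 : pvStepA (0, 0) p = (1, pvGrade p.2) := by
    simp only [pvStepA]; norm_num
  have hB1 : pvStepB (0, []) p = (pvGrade p.2, [p.1]) := by
    simp [pvStepB]
  rw [List.foldl_cons (f := pvStepA), hA1, foldA_snd rest 1 (pvGrade p.2) (by omega),
      List.foldl_cons (f := pvStepB), hB1, foldB rest (pvGrade p.2) [p.1] (by simp)]
  set M := rest.foldl pvMaxStep (pvGrade p.2) with hM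
  -- A's second loop: replace the lookup by the pair's own value, then it is a filter
  have hcongr : (p :: rest).foldl (pvStepA2 (p :: rest) M) []
      = (p :: rest).foldl (fun (acc : List String) i =>
          if pvGrade i.2 == M then acc ++ [i.1] else acc) [] := by
    apply PySem.List.foldl_congr_mem
    intro acc i hi
    rw [pvStepA2, lookup_self _ hnd i hi, Option.getD_some]
  rw [hcongr, PySem.List.foldl_append_if (fun i => pvGrade i.2 == M) Prod.fst]
  simp only [List.nil_append, List.filter_cons]
  refine Prod.ext rfl ?_
  by_cases hE : pvGrade p.2 = M
  · simp [hE]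
  · have h1 : (pvGrade p.2 == M) = false := by
      simp only [beq_eq_false_iff_ne, ne_eq]; exact hE
    have h2 : ¬ M = pvGrade p.2 := fun h => hE h.symm
    simp [h1, h2]
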